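-- pv_equiv track=rewrite | github.com/dsprad99/LargeScaleEntityMatchingForTheAdvisor | Kmer.py | mer_builder
-- ===== SOURCE A (Python) =====
-- def mer_builder(paper_title,x, lower_case = False, remove_spaces = False):
--
--     if paper_title is None:
--         return []
--
--     mer_array = []
--     current_mer = ""
--     i = 0
--     while len(current_mer) < x and i < len(paper_title):
--         if remove_spaces and paper_title[i] == ' ':
--             i += 1
--             continue
--         current_mer += paper_title[i]
--         i += 1
--
--     if lower_case:
--         current_mer = current_mer.lower()
--     mer_array.append(current_mer)
--
--     while i < len(paper_title):
--         #we will skip the current character value we are on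
--         #if remove_spaces is true and we have a space
--         if remove_spaces and paper_title[i] == ' ':
--             i += 1
--             continue
--         #remove the first character of the current mer
--         #and add the next character not in the mer
--         current_mer = current_mer[1:] + paper_title[i]
--         if lower_case:
--             current_mer = current_mer.lower()
--         mer_array.append(current_mer)
--         i += 1
--
--     return mer_array
-- ===== SOURCE B (Python) =====
-- def mer_builder(paper_title, x, lower_case = False, remove_spaces = False):
--     if paper_title is None:
--         return []
--     x = max(x, 0)  # a window size below 0 makes no sense; treat it as 0 (empty windows)
--     s = paper_title
--     if remove_spaces:
--         s = ''.join(c for c in s if c != ' ')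
--     if lower_case:
--         s = s.lower()
--     if len(s) < x:
--         return [s]
--     return [s[i:i+x] for i in range(len(s) - x + 1)]
-- ===== Notes on version B (the rewrite author's own statement) =====
-- stated objective: simpler
-- what changed: A's two incremental while-loops (grow a rolling mer, then drop-first-append-next, skipping spaces and lowercasing on the fly) are replaced by preprocessing the string once (strip spaces, lowercase, clamp the window size at 0) and then emitting every window as a slice s[i:i+x] in one comprehension.
-- intended difference: For non-positive window size x on a title with at least one kept character, A returns [''] followed by one single-character mer per kept character (leftover rolling-loop state), while B returns len+1 empty strings (the empty windows of the clamped size); B's is the intended reading of 'all length-x windows' (effectively empty titles, where both give [''], stay outside D_). — e.g. on mer_builder(some "ab", 0, false, false): A returns ["", "a", "b"], B returns ["", "", ""]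
import Mathlib
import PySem

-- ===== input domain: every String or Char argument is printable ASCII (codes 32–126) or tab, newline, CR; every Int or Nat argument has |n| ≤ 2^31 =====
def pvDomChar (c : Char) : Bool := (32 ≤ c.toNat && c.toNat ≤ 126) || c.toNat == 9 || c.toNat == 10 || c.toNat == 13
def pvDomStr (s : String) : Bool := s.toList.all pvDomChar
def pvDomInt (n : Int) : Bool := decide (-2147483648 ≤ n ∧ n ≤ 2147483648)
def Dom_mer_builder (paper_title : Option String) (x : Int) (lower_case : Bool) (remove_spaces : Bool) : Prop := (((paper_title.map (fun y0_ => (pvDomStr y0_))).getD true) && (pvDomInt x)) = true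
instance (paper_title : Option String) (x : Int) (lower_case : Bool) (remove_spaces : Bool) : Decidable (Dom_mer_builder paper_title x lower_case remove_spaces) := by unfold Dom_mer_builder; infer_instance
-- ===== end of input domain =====

-- B replaces A's incremental rolling-window loop (drop first char, append next, skipping spaces
-- on the fly) by a preprocess-once (filter spaces, lowercase) then slice-every-window decomposition
-- (objective: simpler).

-- ===== PORT A =====
-- first while loop: grow current_mer until len(current_mer) ≥ x or the title is exhausted
def merFirstA (x : Int) (rs : Bool) : List Char → List Char → List Char × List Char
  | cur, [] => (cur, [])
  | cur, c :: rest' =>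
    if (cur.length : Int) < x then
      (if rs && (c == ' ') then merFirstA x rs cur rest'
       else merFirstA x rs (cur ++ [c]) rest')
    else (cur, c :: rest')

-- pure rolling loop (space-skipping already done)

-- second while loop: roll the window over the remaining characters
def merRollA (lc rs : Bool) (cur : List Char) : List Char → List (List Char)
  | [] => []
  | c :: rest =>
    if rs && (c == ' ') then merRollA lc rs cur rest
    else
      let m0 := cur.drop 1 ++ [c]
      let m := if lc then PySem.Chars.lower m0 else m0
      m :: merRollA lc rs m rest

def mer_builder (paper_title : Option String) (x : Int) (lower_case : Bool) (remove_spaces : Bool) : List String :=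
  match paper_title with
  | none => []
  | some t =>
    let fr := merFirstA x remove_spaces [] t.toList
    let cur := if lower_case then PySem.Chars.lower fr.1 else fr.1
    String.ofList cur :: (merRollA lower_case remove_spaces cur fr.2).map String.ofList

-- ===== PORT B =====
def mer_builder_alt (paper_title : Option String) (x : Int) (lower_case : Bool) (remove_spaces : Bool) : List String :=
  match paper_title with
  | none => []
  | some t =>
    let x := max x 0
    let s1 := if remove_spaces then String.ofList (t.toList.filter (fun c => !(c == ' '))) else t
    let s := if lower_case then PySem.Str.lower s1 else s1
    if PySem.Str.len s < x then [s]
    else (PySem.List.pyRange 0 (PySem.Str.len s - x + 1) 1).map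
      (fun i => PySem.Str.slice s (some i) (some (i + x)))

-- ===== PRECONDITION & SPEC =====
-- For non-positive window size x (a degenerate query) on a title with at least one kept
-- character, A returns [''] followed by one single-character mer per kept character
-- (leftover rolling-loop state), while B returns len + 1 empty strings (the empty windows
-- of a clamped window size); B's value is the intended reading of "all length-x windows".
-- On an effectively empty title (every character a removed space) both return [''], so such
-- titles stay outside D_.
def D_mer_builder (paper_title : Option String) (x : Int) (lower_case : Bool) (remove_spaces : Bool) : Prop :=
  paper_title ≠ none ∧ x ≤ 0 ∧
    ¬(((paper_title.getD "").toList.all (fun c => remove_spaces && (c == ' '))) = true)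
instance (paper_title : Option String) (x : Int) (lower_case : Bool) (remove_spaces : Bool) : Decidable (D_mer_builder paper_title x lower_case remove_spaces) := by unfold D_mer_builder; infer_instance

def Spec_mer_builder (paper_title : Option String) (x : Int) (lower_case : Bool) (remove_spaces : Bool) (out : List String) : Prop := ¬ D_mer_builder paper_title x lower_case remove_spaces → out = mer_builder_alt paper_title x lower_case remove_spaces
instance (paper_title : Option String) (x : Int) (lower_case : Bool) (remove_spaces : Bool) (out : List String) : Decidable (Spec_mer_builder paper_title x lower_case remove_spaces out) := by unfold Spec_mer_builder; infer_instance

def pvDiffWitness_mer_builder : Option String × Int × Bool × Bool := (some "ab", 0, false, false)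
def pvDiffWitnessOut_mer_builder : (List String) × (List String) := (["", "a", "b"], ["", "", ""])

-- ===== CLAIM (what is proved, stated in full; the proofs are below) =====
def Claim_unchanged_mer_builder : Prop := ∀ (paper_title : Option String) (x : Int) (lower_case : Bool) (remove_spaces : Bool), Dom_mer_builder paper_title x lower_case remove_spaces → Spec_mer_builder paper_title x lower_case remove_spaces (mer_builder paper_title x lower_case remove_spaces)
def Claim_changed_mer_builder : Prop := Dom_mer_builder (pvDiffWitness_mer_builder.1) (pvDiffWitness_mer_builder.2.1) (pvDiffWitness_mer_builder.2.2.1) (pvDiffWitness_mer_builder.2.2.2) ∧ D_mer_builder (pvDiffWitness_mer_builder.1) (pvDiffWitness_mer_builder.2.1) (pvDiffWitness_mer_builder.2.2.1) (pvDiffWitness_mer_builder.2.2.2) ∧ mer_builder (pvDiffWitness_mer_builder.1) (pvDiffWitness_mer_builder.2.1) (pvDiffWitness_mer_builder.2.2.1) (pvDiffWitness_mer_builder.2.2.2) = pvDiffWitnessOut_mer_builder.1 ∧ mer_builder_alt (pvDiffWitness_mer_builder.1) (pvDiffWitness_mer_builder.2.1) (pvDiffWitness_mer_builder.2.2.1)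 (pvDiffWitness_mer_builder.2.2.2) = pvDiffWitnessOut_mer_builder.2 ∧ pvDiffWitnessOut_mer_builder.1 ≠ pvDiffWitnessOut_mer_builder.2
def Claim_exact_mer_builder : Prop := ∀ (paper_title : Option String) (x : Int) (lower_case : Bool) (remove_spaces : Bool), Dom_mer_builder paper_title x lower_case remove_spaces → D_mer_builder paper_title x lower_case remove_spaces → mer_builder paper_title x lower_case remove_spaces ≠ mer_builder_alt paper_title x lower_case remove_spaces

-- ===== LEMMAS AND PROOFS =====

-- the characters of the title that survive space removal
def pvEff (rs : Bool) (cs : List Char) : List Char :=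
  if rs then cs.filter (fun c => !(c == ' ')) else cs

theorem pvEff_eq_nil_iff (rs : Bool) (cs : List Char) :
    pvEff rs cs = [] ↔ (cs.all (fun c => rs && (c == ' '))) = true := by
  cases rs
  · simp only [pvEff, Bool.false_eq_true, reduceIte, Bool.false_and, List.all_eq_true]
    constructor
    · rintro rfl c hc; cases hc
    · intro h
      cases cs with
      | nil => rfl
      | cons c cs => exact absurd (h c (by simp)) (by simp)
  · simp [pvEff, List.filter_eq_nil_iff]

def merRollP (lc : Bool) (cur : List Char) : List Char → List (List Char)
  | [] => []
  | c :: rest =>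
    let m := if lc then PySem.Chars.lower (cur.drop 1 ++ [c]) else cur.drop 1 ++ [c]
    m :: merRollP lc m rest

def merRollQ (cur : List Char) : List Char → List (List Char)
  | [] => []
  | c :: rest => (cur.drop 1 ++ [c]) :: merRollQ (cur.drop 1 ++ [c]) rest

theorem pvEff_nil (rs : Bool) : pvEff rs [] = [] := by cases rs <;> simp [pvEff]

theorem pvEff_cons_sp (rest : List Char) : pvEff true (' ' :: rest) = pvEff true rest := by
  simp [pvEff]

theorem pvEff_cons_keep (rs : Bool) (c : Char) (rest : List Char) (h : rs = false ∨ (c == ' ') = false) :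
    pvEff rs (c :: rest) = c :: pvEff rs rest := by
  rcases h with h | h
  · simp [pvEff, h]
  · have hc : ¬ c = ' ' := by simpa using h
    cases rs <;> simp [pvEff, hc]

theorem merFirstA_fst (x : Int) (rs : Bool) (rest : List Char) :
    ∀ cur, (merFirstA x rs cur rest).1 = cur ++ (pvEff rs rest).take (x.toNat - cur.length) := by
  induction rest with
  | nil => intro cur; simp [merFirstA, pvEff_nil]
  | cons c rest ih =>
    intro cur
    by_cases hlt : (cur.length : Int) < x
    · have hk : cur.length < x.toNat := by omega
      rw [merFirstA, if_pos hlt]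
      by_cases hsp : rs && (c == ' ')
      · rw [if_pos hsp]
        rcases Bool.and_eq_true_iff.mp hsp with ⟨hrs, hc⟩
        have hc' : c = ' ' := by simpa using hc
        subst hc' hrs
        rw [ih cur, pvEff_cons_sp]
      · rw [if_neg hsp]
        have hkeep : rs = false ∨ (c == ' ') = false := by
          by_cases hrs : rs
          · right; subst hrs; simpa using hsp
          · left; simpa using hrs
        rw [ih (cur ++ [c]), pvEff_cons_keep rs c rest hkeep]
        have : x.toNat - cur.length = (x.toNat - (cur.length + 1)) + 1 := by omega
        rw [this, List.take_succ_cons]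
        simp
    · rw [merFirstA, if_neg hlt]
      have : x.toNat - cur.length = 0 := by omega
      simp [this]

theorem merFirstA_snd (x : Int) (rs : Bool) (rest : List Char) :
    ∀ cur, pvEff rs (merFirstA x rs cur rest).2 = (pvEff rs rest).drop (x.toNat - cur.length) := by
  induction rest with
  | nil => intro cur; simp [merFirstA, pvEff_nil]
  | cons c rest ih =>
    intro cur
    by_cases hlt : (cur.length : Int) < x
    · have hk : cur.length < x.toNat := by omega
      rw [merFirstA, if_pos hlt]
      by_cases hsp : rs && (c == ' ')
      · rw [if_pos hsp]
        rcases Bool.and_eq_true_iff.mp hsp with ⟨hrs, hc⟩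
        have hc' : c = ' ' := by simpa using hc
        subst hc' hrs
        rw [ih cur, pvEff_cons_sp]
      · rw [if_neg hsp]
        have hkeep : rs = false ∨ (c == ' ') = false := by
          by_cases hrs : rs
          · right; subst hrs; simpa using hsp
          · left; simpa using hrs
        rw [ih (cur ++ [c]), pvEff_cons_keep rs c rest hkeep]
        have : x.toNat - cur.length = (x.toNat - (cur.length + 1)) + 1 := by omega
        rw [this, List.drop_succ_cons]
        simp
    · rw [merFirstA, if_neg hlt]
      have : x.toNat - cur.length = 0 := by omega
      rw [this]
      simp

theorem merRollA_eq_P (lc rs : Bool) (rest : List Char) :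
    ∀ cur, merRollA lc rs cur rest = merRollP lc cur (pvEff rs rest) := by
  induction rest with
  | nil => intro cur; simp [merRollA, pvEff_nil, merRollP]
  | cons c rest ih =>
    intro cur
    by_cases hsp : rs && (c == ' ')
    · rw [merRollA, if_pos hsp]
      rcases Bool.and_eq_true_iff.mp hsp with ⟨hrs, hc⟩
      have hc' : c = ' ' := by simpa using hc
      subst hc' hrs
      rw [ih cur, pvEff_cons_sp]
    · have hkeep : rs = false ∨ (c == ' ') = false := by
        by_cases hrs : rs
        · right; subst hrs; simpa using hsp
        · left; simpa using hrs
      rw [merRollA, if_neg hsp, pvEff_cons_keep rs c rest hkeep, merRollP]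
      simp only [ih]

theorem lowerChar_idem (c : Char) : PySem.Chars.lowerChar (PySem.Chars.lowerChar c) = PySem.Chars.lowerChar c := by
  unfold PySem.Chars.lowerChar PySem.Chars.isupper
  by_cases h1 : 'A' ≤ c
  · by_cases h2 : c ≤ 'Z'
    · have hn1 : 65 ≤ c.toNat := h1
      have hn2 : c.toNat ≤ 90 := h2
      have hv : (c.toNat + 32).isValidChar := Or.inl (by omega)
      have ht : (Char.ofNat (c.toNat + 32)).toNat = c.toNat + 32 := by
        rw [Char.toNat_ofNat]; simp [hv]
      simp only [h1, h2, decide_true, Bool.and_self, if_pos]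
      have hA : ¬ ('A' ≤ Char.ofNat (c.toNat + 32) ∧ Char.ofNat (c.toNat + 32) ≤ 'Z') := by
        rintro ⟨ha, hb⟩
        have : (Char.ofNat (c.toNat + 32)).toNat ≤ 90 := hb
        omega
      rcases Decidable.not_and_iff_not_or_not.mp hA with h | h <;> simp [h]
    · simp [h2]
  · simp [h1]

theorem lower_idem (a : List Char) : PySem.Chars.lower (PySem.Chars.lower a) = PySem.Chars.lower a := by
  simp [PySem.Chars.lower, List.map_map, Function.comp_def, lowerChar_idem]

theorem lower_append (a b : List Char) : PySem.Chars.lower (a ++ b) = PySem.Chars.lower a ++ PySem.Chars.lower b := by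
  simp [PySem.Chars.lower]

theorem lower_drop (a : List Char) (n : Nat) : PySem.Chars.lower (a.drop n) = (PySem.Chars.lower a).drop n := by
  simp [PySem.Chars.lower, List.map_drop]

theorem lower_take (a : List Char) (n : Nat) : PySem.Chars.lower (a.take n) = (PySem.Chars.lower a).take n := by
  simp [PySem.Chars.lower, List.map_take]

theorem lower_length (a : List Char) : (PySem.Chars.lower a).length = a.length := by
  simp [PySem.Chars.lower]

theorem merRollP_false (rest : List Char) : ∀ cur, merRollP false cur rest = merRollQ cur rest := by
  induction rest with
  | nil => intro cur; rfl
  | cons c rest ih => intro cur; simp [merRollP, merRollQ, ih]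

theorem merRollP_true (rest : List Char) :
    ∀ cur, cur = PySem.Chars.lower cur →
      merRollP true cur rest = merRollQ cur (PySem.Chars.lower rest) := by
  induction rest with
  | nil => intro cur _; rfl
  | cons c rest ih =>
    intro cur hcur
    have hm : PySem.Chars.lower (cur.drop 1 ++ [c]) = cur.drop 1 ++ [PySem.Chars.lowerChar c] := by
      rw [lower_append, lower_drop, ← hcur]
      simp [PySem.Chars.lower]
    have hfix : cur.drop 1 ++ [PySem.Chars.lowerChar c]
        = PySem.Chars.lower (cur.drop 1 ++ [PySem.Chars.lowerChar c]) := by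
      rw [lower_append, lower_drop, ← hcur]
      simp [PySem.Chars.lower, lowerChar_idem]
    show (PySem.Chars.lower (cur.drop 1 ++ [c]))
        :: merRollP true (PySem.Chars.lower (cur.drop 1 ++ [c])) rest
      = merRollQ cur (PySem.Chars.lowerChar c :: PySem.Chars.lower rest)
    rw [hm, merRollQ, ih _ hfix]

theorem merRollQ_windows (rest : List Char) :
    ∀ cur, 1 ≤ cur.length →
      merRollQ cur rest
        = (List.range rest.length).map (fun i => ((cur ++ rest).drop (i+1)).take cur.length) := by
  induction rest with
  | nil => intro cur _; simp [merRollQ]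
  | cons c rest ih =>
    intro cur hcur
    obtain ⟨d, cur', rfl⟩ : ∃ d cur', cur = d :: cur' := by
      cases cur with
      | nil => simp at hcur
      | cons d cur' => exact ⟨d, cur', rfl⟩
    have hm : (d :: cur').drop 1 ++ [c] = cur' ++ [c] := by simp
    rw [merRollQ, hm]
    have hlen : (cur' ++ [c]).length = (d :: cur').length := by simp
    rw [ih (cur' ++ [c]) (by simp)]
    rw [show (c :: rest).length = rest.length + 1 from rfl, List.range_succ_eq_map]
    simp only [List.map_cons, List.map_map]
    congr 1
    · -- head: take over append
      have h1 : (d :: cur' ++ c :: rest).drop 1 = (cur' ++ [c]) ++ rest := by simp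
      have h2 : (d :: cur').length = (cur' ++ [c]).length := by simp
      rw [h1, h2, List.take_left]
    · -- tails agree
      apply List.map_congr_left
      intro i _
      show (((cur' ++ [c]) ++ rest).drop (i+1)).take (cur' ++ [c]).length
          = ((d :: cur' ++ c :: rest).drop (i.succ+1)).take (d :: cur').length
      have h1 : (d :: cur' ++ c :: rest).drop (i.succ+1) = ((cur' ++ [c]) ++ rest).drop (i+1) := by
        simp [List.append_assoc]
      rw [h1, hlen]

theorem merRollP_head_ne (lc : Bool) (c : Char) (rest cur : List Char) :
    ∃ m tl, merRollP lc cur (c :: rest) = m :: tl ∧ m.length = (cur.drop 1).length + 1 := by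
  refine ⟨_, _, rfl, ?_⟩
  cases lc <;> simp [lower_length]

theorem str_eq_ofList (s : String) (l : List Char) (h : s.toList = l) : s = String.ofList l := by
  subst h; simp

-- A's result in terms of the preprocessed character list, for 0 ≤ x

theorem mer_builder_shape (t : String) (x : Int) (lc rs : Bool) :
    mer_builder (some t) x lc rs
      = (String.ofList (((if lc then PySem.Chars.lower (pvEff rs t.toList) else pvEff rs t.toList)).take x.toNat))
        :: (merRollQ ((if lc then PySem.Chars.lower (pvEff rs t.toList) else pvEff rs t.toList).take x.toNat)
              ((if lc then PySem.Chars.lower (pvEff rs t.toList) else pvEff rs t.toList).drop x.toNat)).map String.ofList := by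
  have h1 := merFirstA_fst x rs t.toList []
  have h2 := merFirstA_snd x rs t.toList []
  simp only [List.length_nil, Nat.sub_zero, List.nil_append] at h1 h2
  show (String.ofList (if lc then PySem.Chars.lower (merFirstA x rs [] t.toList).1 else (merFirstA x rs [] t.toList).1))
      :: (merRollA lc rs (if lc then PySem.Chars.lower (merFirstA x rs [] t.toList).1 else (merFirstA x rs [] t.toList).1) (merFirstA x rs [] t.toList).2).map String.ofList = _
  rw [merRollA_eq_P, h1, h2]
  cases lc with
  | false =>
    simp only [Bool.false_eq_true, reduceIte]
    rw [merRollP_false]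
  | true =>
    simp only [reduceIte]
    rw [lower_take, merRollP_true _ _ (by rw [← lower_take, lower_idem]), lower_drop]

theorem alt_toList (t : String) (lc rs : Bool) :
    ((if lc then PySem.Str.lower (if rs then String.ofList (t.toList.filter (fun c => !(c == ' '))) else t)
      else (if rs then String.ofList (t.toList.filter (fun c => !(c == ' '))) else t))).toList
    = (if lc then PySem.Chars.lower (pvEff rs t.toList) else pvEff rs t.toList) := by
  cases lc <;> cases rs <;> simp [pvEff, PySem.Str.toList_lower]

theorem slice_elem (s : String) (j : Nat) (x : Int) (hx : 0 ≤ x) :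
    PySem.Str.slice s (some ((0:Int) + j)) (some ((0:Int) + j + x))
      = String.ofList ((s.toList.drop j).take x.toNat) := by
  apply str_eq_ofList
  rw [PySem.Str.toList_slice, PySem.Chars.slice_eq_listSlice, PySem.List.slice_toNat]
  · congr 1
    · omega
    · congr 1; omega
  · omega
  · omega

theorem unchanged_core (t : String) (x : Int) (lc rs : Bool)
    (hnd : x ≤ 0 → pvEff rs t.toList = []) :
    mer_builder (some t) x lc rs = mer_builder_alt (some t) x lc rs := by
  set x' : Int := max x 0 with hx'
  have hx : 0 ≤ x' := le_max_right x 0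
  have hkk : x'.toNat = x.toNat := by omega
  set v := pvEff rs t.toList with hv
  set w : List Char := (if lc then PySem.Chars.lower v else v) with hw
  have hwl : w.length = v.length := by
    rw [hw]; cases lc <;> simp [lower_length]
  set s : String := (if lc then PySem.Str.lower (if rs then String.ofList (t.toList.filter (fun c => !(c == ' '))) else t) else (if rs then String.ofList (t.toList.filter (fun c => !(c == ' '))) else t)) with hs
  have hsl : s.toList = w := by rw [hs, hw, hv]; exact alt_toList t lc rs
  have hB : mer_builder_alt (some t) x lc rs
      = if PySem.Str.len s < x' then [s]
        else (PySem.List.pyRange 0 (PySem.Str.len s - x' + 1) 1).map (fun i => PySem.Str.slice s (some i) (some (i + x'))) := rfl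
  have hlen : PySem.Str.len s = (w.length : Int) := by rw [PySem.Str.len_eq, hsl]
  have hA := mer_builder_shape t x lc rs
  rw [← hv, ← hw] at hA
  rw [hA, hB, hlen, ← hkk]
  set k := x'.toNat with hk
  set m := w.length with hm
  by_cases hmx : (m : Int) < x'
  · -- len(s) < x : B returns [s]; A's window is the whole string
    rw [if_pos hmx]
    have hkm : m ≤ k := by omega
    have h1 : w.take k = w := List.take_of_length_le (by omega)
    have h2 : w.drop k = [] := List.drop_eq_nil_of_le (by omega)
    rw [h1, h2]
    show [String.ofList w] = [s]
    rw [str_eq_ofList s w hsl]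
  · rw [if_neg hmx]
    have hkm : k ≤ m := by omega
    -- B as a map over List.range
    have hN : ((m : Int) - x' + 1 - 0).toNat = m - k + 1 := by omega
    have hBmap : (PySem.List.pyRange 0 ((m:Int) - x' + 1) 1).map (fun i => PySem.Str.slice s (some i) (some (i + x')))
        = (List.range (m - k + 1)).map (fun j => String.ofList ((w.drop j).take k)) := by
      rw [PySem.List.pyRange_one, hN, List.map_map]
      apply List.map_congr_left
      intro j _
      show PySem.Str.slice s (some ((0:Int) + j)) (some ((0:Int) + j + x')) = _
      rw [slice_elem s j x' hx, hsl, hk]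
    rw [hBmap, List.range_succ_eq_map, List.map_cons, List.map_map]
    simp only [List.drop_zero]
    by_cases hmk : m = k
    · have h2 : w.drop k = [] := List.drop_eq_nil_of_le (by omega)
      rw [h2]
      show [String.ofList (w.take k)] = String.ofList (w.take k) :: (List.range (m - k)).map _
      have : m - k = 0 := by omega
      rw [this]
      simp
    · have hlt : k < m := by omega
      have hk1 : 1 ≤ k := by
        rcases Nat.eq_zero_or_pos k with h0 | h1
        · exfalso
          have hve : v = [] := hnd (by omega)
          have hm0 : m = 0 := by rw [hwl, hve]; rfl
          omega
        · exact h1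
      have hcl : (w.take k).length = k := by
        rw [List.length_take]; omega
      rw [merRollQ_windows (w.drop k) (w.take k) (by omega)]
      rw [List.take_append_drop, hcl, List.length_drop, List.map_map]
      rfl

theorem tight_core (t : String) (x : Int) (lc rs : Bool)
    (hx : x ≤ 0) (hd : pvEff rs t.toList ≠ []) :
    mer_builder (some t) x lc rs ≠ mer_builder_alt (some t) x lc rs := by
  set v := pvEff rs t.toList with hv
  have hfr : merFirstA x rs [] t.toList = ([], t.toList) := by
    cases h : t.toList with
    | nil => rfl
    | cons c cs =>
      rw [merFirstA, if_neg]
      intro hcon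
      simp only [List.length_nil, Int.natCast_zero] at hcon
      omega
  have hcur : (if lc then PySem.Chars.lower ([]:List Char) else ([]:List Char)) = [] := by
    cases lc <;> rfl
  have hA : mer_builder (some t) x lc rs
      = String.ofList [] :: (merRollP lc [] v).map String.ofList := by
    show (String.ofList (if lc then PySem.Chars.lower (merFirstA x rs [] t.toList).1 else (merFirstA x rs [] t.toList).1))
        :: (merRollA lc rs (if lc then PySem.Chars.lower (merFirstA x rs [] t.toList).1 else (merFirstA x rs [] t.toList).1) (merFirstA x rs [] t.toList).2).map String.ofList = _
    rw [hfr]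
    simp only [hcur]
    rw [merRollA_eq_P, ← hv]
  have hx0 : max x 0 = (0:Int) := by omega
  set s : String := (if lc then PySem.Str.lower (if rs then String.ofList (t.toList.filter (fun c => !(c == ' '))) else t) else (if rs then String.ofList (t.toList.filter (fun c => !(c == ' '))) else t)) with hs
  set w : List Char := (if lc then PySem.Chars.lower v else v) with hw
  have hsl : s.toList = w := by rw [hs, hw, hv]; exact alt_toList t lc rs
  have hwl : w.length = v.length := by rw [hw]; cases lc <;> simp [lower_length]
  have hlen : PySem.Str.len s = (v.length : Int) := by rw [PySem.Str.len_eq, hsl, hwl]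
  have hB : mer_builder_alt (some t) x lc rs
      = (PySem.List.pyRange 0 ((v.length : Int) - 0 + 1) 1).map (fun i => PySem.Str.slice s (some i) (some (i + max x 0))) := by
    show (if PySem.Str.len s < max x 0 then [s]
        else (PySem.List.pyRange 0 (PySem.Str.len s - max x 0 + 1) 1).map (fun i => PySem.Str.slice s (some i) (some (i + max x 0)))) = _
    rw [hlen, hx0, if_neg (by omega)]
  clear_value v
  intro heq
  -- v is nonempty: compare the second element (a one-character mer for A, an empty slice for B)
  obtain ⟨c, v', rfl⟩ : ∃ c v', v = c :: v' := by
    cases hveq : v with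
    | nil => exact absurd hveq hd
    | cons c v' => exact ⟨c, v', rfl⟩
  obtain ⟨m1, tl, hPeq, hm1len⟩ := merRollP_head_ne lc c v' []
  simp only [List.drop_nil, List.length_nil, Nat.zero_add] at hm1len
  have hel := congrArg (fun l => l[1]?) heq
  rw [hA, hB, hPeq] at hel
  simp only [List.map_cons, List.getElem?_cons_succ, List.getElem?_cons_zero] at hel
  have hn : (((c :: v').length : Int) - 0 + 1) = (((c :: v').length + 1 : Nat) : Int) := by
    push_cast; omega
  rw [hn, PySem.List.getElem?_map_pyRange_zero _ ((c :: v').length + 1) 1 (by simp)] at hel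
  have hstr : String.ofList m1 = PySem.Str.slice s (some ((1:Nat):Int)) (some (((1:Nat):Int) + max x 0)) := by
    exact Option.some.inj hel
  have htl := congrArg String.toList hstr
  rw [PySem.Str.toList_slice, PySem.Chars.slice_eq_listSlice, PySem.List.slice_toNat] at htl
  · simp only [String.toList_ofList] at htl
    have hlen1 : m1.length = (List.take ((((1:Nat):Int) + max x 0).toNat - ((1:Nat):Int).toNat) (List.drop ((1:Nat):Int).toNat s.toList)).length := by rw [htl]
    rw [List.length_take] at hlen1
    have hz : (((1:Nat):Int) + max x 0).toNat - ((1:Nat):Int).toNat = 0 := by omega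
    rw [hz] at hlen1
    omega
  · omega
  · omega

-- ===== VERDICT (by name: the statements are the Claim_ definitions above) =====
theorem mer_builder_spec : Claim_unchanged_mer_builder := by
  intro paper_title x lc rs _
  unfold Spec_mer_builder
  intro hnd
  cases paper_title with
  | none => rfl
  | some t =>
    apply unchanged_core
    intro hxle
    by_contra hc
    refine hnd ⟨Option.some_ne_none t, hxle, ?_⟩
    simp only [Option.getD_some]
    intro h2
    exact hc ((pvEff_eq_nil_iff rs t.toList).mpr h2)

set_option maxRecDepth 100000 in
theorem mer_builder_changed : Claim_changed_mer_builder := by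
  unfold Claim_changed_mer_builder; decide

theorem mer_builder_tight : Claim_exact_mer_builder := by
  intro paper_title x lc rs _ hD
  obtain ⟨hne, hxle, hd⟩ := hD
  cases paper_title with
  | none => exact absurd rfl hne
  | some t =>
    refine tight_core t x lc rs hxle ?_
    intro h2
    refine hd ?_
    simp only [Option.getD_some]
    exact (pvEff_eq_nil_iff rs t.toList).mp h2
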